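-- pv_equiv track=rewrite | github.com/divyansha/SpuCo | src/spuco/datasets/spuco_mnist.py | validate_classes
-- ===== SOURCE A (Python) =====
-- from typing import List, Optional, Callable
--
-- def validate_classes(classes: List[List[int]]) -> bool:
--     """
--     Validates that the classes provided to the `SpuCoMNIST` dataset are disjoint and only contain integers
--     between 0 and 9.
--
--     :param classes: The classes to be included in the dataset, where each element is a list of integers
--         representing the digits to be included in a single class.
--     :type classes: List[List[int]]
--
--     :return: Whether the classes are valid.
--     :rtype: bool
--     """
--     sets = [set(latent_class) for latent_class in classes]
--
--     for i in range(len(sets)):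
--         if any([x < 0 or x > 9 for x in sets[i]]):
--             return False
--         for j in range(i + 1, len(sets)):
--             if sets[i].intersection(sets[j]):
--                 return False
--     return True
-- ===== SOURCE B (Python) =====
-- def validate_classes(classes):
--     """Flat one-shot check: concat the deduplicated classes, then compare sizes
--     for disjointness and test the 0-9 range in a single pass."""
--     all_digits = [x for latent_class in classes for x in dict.fromkeys(latent_class)]
--     return len(set(all_digits)) == len(all_digits) and all(0 <= x <= 9 for x in all_digits)
-- ===== Notes on version B (the rewrite author's own statement) =====
-- stated objective: simpler
-- what changed: Replaces the nested pairwise intersection loops with a single flatten of the deduplicated classes, testing disjointness in one shot by comparing len(set(all_digits)) to len(all_digits) and the 0-9 range with one all().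
import Mathlib
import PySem

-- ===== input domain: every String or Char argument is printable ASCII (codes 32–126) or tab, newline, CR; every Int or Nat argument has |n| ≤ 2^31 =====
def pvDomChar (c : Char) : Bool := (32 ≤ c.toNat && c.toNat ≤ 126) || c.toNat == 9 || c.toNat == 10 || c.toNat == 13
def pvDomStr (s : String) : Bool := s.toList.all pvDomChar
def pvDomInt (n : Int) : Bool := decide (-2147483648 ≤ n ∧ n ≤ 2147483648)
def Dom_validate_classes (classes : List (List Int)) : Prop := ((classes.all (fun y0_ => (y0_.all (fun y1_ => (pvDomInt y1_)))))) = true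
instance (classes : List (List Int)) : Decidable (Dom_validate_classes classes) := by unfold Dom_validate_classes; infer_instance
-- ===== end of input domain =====

-- B flattens the deduplicated classes once and compares set-size to list-size for
-- disjointness, plus one range pass — instead of A's nested pairwise intersection loops.

-- ===== PORT A =====
-- inner 'for j in range(i+1, len(sets)): if sets[i].intersection(sets[j]): return False'
def vcInner (s : PySem.Set Int) : List (PySem.Set Int) → Bool
  | [] => false
  | t :: rest => if PySem.Set.inter s t ≠ [] then true else vcInner s rest

-- outer 'for i in range(len(sets)):' with its two early returns
def vcLoop : List (PySem.Set Int) → Bool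
  | [] => true
  | s :: rest =>
    if s.any (fun x => decide (x < 0) || decide (x > 9)) then false
    else if vcInner s rest then false
    else vcLoop rest

def validate_classes (classes : List (List Int)) : Bool :=
  vcLoop (classes.map (fun latent_class => PySem.Set.ofList latent_class))

-- ===== PORT B =====
def validate_classes_alt (classes : List (List Int)) : Bool :=
  let all_digits := classes.flatMap (fun latent_class => PySem.List.dedup latent_class)
  (PySem.Set.ofList all_digits).length == all_digits.length
    && all_digits.all (fun x => decide (0 ≤ x) && decide (x ≤ 9))

-- ===== PRECONDITION & SPEC =====
def Spec_validate_classes (classes : List (List Int)) (out : Bool) : Prop := out = validate_classes_alt classes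
instance (classes : List (List Int)) (out : Bool) : Decidable (Spec_validate_classes classes out) := by unfold Spec_validate_classes; infer_instance

-- ===== CLAIM (what is proved, stated in full; the proofs are below) =====
def Claim_equal_validate_classes : Prop := ∀ (classes : List (List Int)), Dom_validate_classes classes → Spec_validate_classes classes (validate_classes classes)

-- ===== LEMMAS AND PROOFS =====

-- ===== VERDICT (by name: the statement is the Claim_ definition above) =====
-- ofList shortens a list exactly when it has duplicates
theorem len_ofList_eq_iff (l : List Int) :
    (PySem.Set.ofList l).length = l.length ↔ l.Nodup := by
  induction l with
  | nil => simp [PySem.Set.ofList_nil]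
  | cons x xs ih =>
    rw [PySem.Set.ofList_cons]
    simp only [List.length_cons, List.nodup_cons]
    by_cases hx : x ∈ xs
    · have hlt : ((PySem.Set.ofList xs).discard x).length < (PySem.Set.ofList xs).length := by
        have hm : x ∈ PySem.Set.ofList xs := (PySem.Set.mem_ofList xs x).mpr hx
        simp only [PySem.Set.discard]
        have hle := List.length_filter_le (fun y => !(y == x)) (PySem.Set.ofList xs)
        have hne : ¬ ((PySem.Set.ofList xs).filter (fun y => !(y == x))).length
            = (PySem.Set.ofList xs).length := by
          rw [List.length_filter_eq_length_iff]
          intro hall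
          have := hall x hm
          simp at this
        omega
      have hle := PySem.Set.length_ofList_le (xs := xs)
      constructor
      · intro h; omega
      · intro h; exact absurd hx h.1
    · have heq : (PySem.Set.ofList xs).discard x = PySem.Set.ofList xs := by
        simp only [PySem.Set.discard]
        apply List.filter_eq_self.mpr
        intro y hy
        have hyx : y ∈ xs := (PySem.Set.mem_ofList xs y).mp hy
        rcases eq_or_ne y x with rfl | hne
        · exact absurd hyx hx
        · simp [hne]
      rw [heq]
      constructor
      · intro h; exact ⟨hx, ih.mp (by omega)⟩
      · intro h; have := ih.mpr h.2; omega

theorem vcInner_eq_true_iff (s : PySem.Set Int) (rest : List (PySem.Set Int)) :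
    vcInner s rest = true ↔ ∃ t ∈ rest, ∃ x ∈ s, x ∈ t := by
  induction rest with
  | nil => simp [vcInner]
  | cons t rest ih =>
    simp only [vcInner]
    split_ifs with h
    · simp only [true_iff]
      obtain ⟨x, hx⟩ := List.exists_mem_of_ne_nil _ h
      have := (PySem.Set.mem_inter s t x).mp hx
      exact ⟨t, List.mem_cons_self .., x, this.1, this.2⟩
    · rw [ih]
      constructor
      · rintro ⟨u, hu, x, hxs, hxu⟩; exact ⟨u, List.mem_cons_of_mem _ hu, x, hxs, hxu⟩
      · rintro ⟨u, hu, x, hxs, hxu⟩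
        rcases List.mem_cons.mp hu with rfl | hu
        · exact absurd (List.ne_nil_of_mem ((PySem.Set.mem_inter s u x).mpr ⟨hxs, hxu⟩)) h
        · exact ⟨u, hu, x, hxs, hxu⟩

theorem vcLoop_eq_true_iff (sets : List (PySem.Set Int)) (h : ∀ s ∈ sets, s.Nodup) :
    vcLoop sets = true ↔
      ((∀ x ∈ sets.flatten, 0 ≤ x ∧ x ≤ 9) ∧ sets.flatten.Nodup) := by
  induction sets with
  | nil => simp [vcLoop]
  | cons s rest ih =>
    simp only [vcLoop, List.flatten_cons, List.nodup_append]
    have hs : s.Nodup := h s (List.mem_cons_self ..)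
    have ih' := ih (fun t ht => h t (List.mem_cons_of_mem _ ht))
    split_ifs with hbad hint
    · simp only [false_iff]
      rintro ⟨hrange, -⟩
      simp only [List.any_eq_true, Bool.or_eq_true, decide_eq_true_eq] at hbad
      obtain ⟨x, hxs, hx⟩ := hbad
      have := hrange x (List.mem_append_left _ hxs)
      omega
    · simp only [false_iff]
      rintro ⟨-, -, -, hdisj⟩
      obtain ⟨t, ht, x, hxs, hxt⟩ := (vcInner_eq_true_iff s rest).mp hint
      exact hdisj x hxs x (List.mem_flatten.mpr ⟨t, ht, hxt⟩) rfl
    · rw [ih']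
      simp only [List.any_eq_true, Bool.or_eq_true, decide_eq_true_eq] at hbad
      push Not at hbad
      constructor
      · rintro ⟨hr, hn⟩
        refine ⟨?_, hs, hn, ?_⟩
        · intro x hx
          rcases List.mem_append.mp hx with hx | hx
          · have := hbad x hx; omega
          · exact hr x hx
        · intro x hxs y hyf heq
          subst heq
          obtain ⟨t, ht, hxt⟩ := List.mem_flatten.mp hyf
          exact hint ((vcInner_eq_true_iff s rest).mpr ⟨t, ht, x, hxs, hxt⟩)
      · rintro ⟨hr, -, hn, -⟩
        exact ⟨fun x hx => hr x (List.mem_append_right _ hx), hn⟩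

theorem alt_eq_true_iff (classes : List (List Int)) :
    validate_classes_alt classes = true ↔
      ((∀ x ∈ (classes.map (fun c => PySem.Set.ofList c)).flatten, 0 ≤ x ∧ x ≤ 9) ∧
        (classes.map (fun c => PySem.Set.ofList c)).flatten.Nodup) := by
  unfold validate_classes_alt
  have hfl : classes.flatMap (fun c => PySem.List.dedup c)
      = (classes.map (fun c => PySem.Set.ofList c)).flatten := by
    simp [List.flatMap_def]
  simp only [hfl, Bool.and_eq_true, beq_iff_eq, List.all_eq_true, decide_eq_true_eq,
    Bool.and_eq_true, len_ofList_eq_iff]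
  constructor
  · rintro ⟨hn, hr⟩
    exact ⟨fun x hx => by have := hr x hx; omega, hn⟩
  · rintro ⟨hr, hn⟩
    exact ⟨hn, fun x hx => by have := hr x hx; exact ⟨by omega, by omega⟩⟩

theorem validate_classes_spec : Claim_equal_validate_classes := by
  intro classes _
  unfold Spec_validate_classes
  rw [Bool.eq_iff_iff, validate_classes, vcLoop_eq_true_iff _ (by
    intro s hs; simp only [List.mem_map] at hs
    obtain ⟨c, _, rfl⟩ := hs; exact PySem.Set.nodup_ofList c), alt_eq_true_iff]
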